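-- pv_equiv track=rewrite | github.com/nmr-cnbch/CCR_scripts | read_ucsf_objectowo.py | generate_4Dvec_set
-- ===== SOURCE A (Python) =====
-- from copy import deepcopy
--
-- def generate_4Dvec_set(distance:int) -> list:
--     vec_set = []
--     for d_1 in range(-distance, distance+1):
--         for d_2 in range(-distance, distance+1):
--             for d_3 in range(-distance, distance+1):
--                 for d_4 in range(-distance, distance+1):
--                     vec = [d_1,d_2,d_3,d_4]
--                     vec_set.append(deepcopy(vec))
--     return vec_set
-- ===== SOURCE B (Python) =====
-- def generate_4Dvec_set(distance: int) -> list: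
--     vals = list(range(-distance, distance + 1))
--     result = [[]]
--     for _ in range(4):
--         result = [vec + [v] for vec in result for v in vals]
--     return result
-- ===== Notes on version B (the rewrite author's own statement) =====
-- stated objective: alternative
-- what changed: Replaces the four fixed nested loops appending deep-copied vectors with an iterative Cartesian-product accumulator that extends every partial vector by each coordinate value, four times.
import Mathlib
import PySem

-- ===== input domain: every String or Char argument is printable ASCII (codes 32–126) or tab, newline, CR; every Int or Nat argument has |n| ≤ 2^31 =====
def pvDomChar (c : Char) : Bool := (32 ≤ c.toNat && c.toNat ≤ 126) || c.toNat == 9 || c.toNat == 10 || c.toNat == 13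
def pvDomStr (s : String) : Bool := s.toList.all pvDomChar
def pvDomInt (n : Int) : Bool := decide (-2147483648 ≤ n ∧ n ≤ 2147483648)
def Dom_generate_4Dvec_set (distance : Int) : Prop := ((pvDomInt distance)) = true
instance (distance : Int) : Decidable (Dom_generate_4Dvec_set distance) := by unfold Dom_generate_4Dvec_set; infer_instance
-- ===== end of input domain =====

-- ===== PORT A =====
-- Literal port of A: four nested loops over range(-distance, distance+1), appending [d1,d2,d3,d4].
def generate_4Dvec_set (distance : Int) : List (List Int) :=
  let r := PySem.List.pyRange (-distance) (distance + 1) 1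
  r.foldl (fun acc d1 =>
    r.foldl (fun acc d2 =>
      r.foldl (fun acc d3 =>
        r.foldl (fun acc d4 => acc ++ [[d1, d2, d3, d4]]) acc) acc) acc) []

-- ===== PORT B =====
-- Port of B: Cartesian-product accumulator, extended once per coordinate (4 times).
def pvExtend (vals : List Int) (acc : List (List Int)) : List (List Int) :=
  acc.flatMap (fun vec => vals.map (fun v => vec ++ [v]))

def generate_4Dvec_set_alt (distance : Int) : List (List Int) :=
  let vals := PySem.List.pyRange (-distance) (distance + 1) 1
  (List.range 4).foldl (fun acc _ => pvExtend vals acc) [[]]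

-- ===== PRECONDITION & SPEC =====
def Spec_generate_4Dvec_set (distance : Int) (out : List (List Int)) : Prop := out = generate_4Dvec_set_alt distance
instance (distance : Int) (out : List (List Int)) : Decidable (Spec_generate_4Dvec_set distance out) := by unfold Spec_generate_4Dvec_set; infer_instance

-- ===== CLAIM (what is proved, stated in full; the proofs are below) =====
def Claim_equal_generate_4Dvec_set : Prop := ∀ (distance : Int), Dom_generate_4Dvec_set distance → Spec_generate_4Dvec_set distance (generate_4Dvec_set distance)

-- ===== LEMMAS AND PROOFS =====

-- ===== VERDICT (by name: the statement is the Claim_ definition above) =====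
theorem pvA_flatMap (distance : Int) :
    generate_4Dvec_set distance =
      (PySem.List.pyRange (-distance) (distance + 1) 1).flatMap (fun d1 =>
        (PySem.List.pyRange (-distance) (distance + 1) 1).flatMap (fun d2 =>
          (PySem.List.pyRange (-distance) (distance + 1) 1).flatMap (fun d3 =>
            (PySem.List.pyRange (-distance) (distance + 1) 1).map (fun d4 => [d1, d2, d3, d4])))) := by
  unfold generate_4Dvec_set
  simp only [PySem.List.foldl_append_singleton_eq_map, PySem.List.foldl_append_eq_flatMap,
    List.nil_append]

theorem generate_4Dvec_set_spec : Claim_equal_generate_4Dvec_set := by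
  intro distance _
  unfold Spec_generate_4Dvec_set
  rw [pvA_flatMap]
  unfold generate_4Dvec_set_alt
  show _ = (List.range 4).foldl _ [[]]
  simp only [List.range_succ, List.range_zero, List.foldl_append, List.foldl_cons,
    List.foldl_nil, pvExtend]
  simp [List.flatMap_assoc, List.map_eq_flatMap]
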